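-- pv_equiv track=rewrite | github.com/idelaniyariets/templates-for-inf_ege | solutions/n_9/9_polyakov_12.py | check
-- ===== SOURCE A (Python) =====
-- def check(ln):
--     s = set()
--     for el in ln:
--         s.add(ln.count(el))
--     if 1 in s and sum([el for el in s if el >= 3]) >= 1:
--         return True
--     else:
--         return False
-- ===== SOURCE B (Python) =====
-- def check(ln):
--     srt = sorted(ln)
--     if not srt:
--         return False
--     seen_one = False
--     seen_three = False
--     cur = srt[0]
--     run = 1
--     for x in srt[1:]:
--         if x == cur:
--             run += 1
--         else:
--             if run == 1:
--                 seen_one = True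
--             if run >= 3:
--                 seen_three = True
--             cur = x
--             run = 1
--     if run == 1:
--         seen_one = True
--     if run >= 3:
--         seen_three = True
--     return seen_one and seen_three
-- ===== Notes on version B (the rewrite author's own statement) =====
-- stated objective: faster
-- what changed: B sorts the list and detects run lengths in one grouping pass (flags for a run of length 1 and a run of length >= 3), instead of A's per-element list.count calls collected into a set plus a sum test.
import Mathlib
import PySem

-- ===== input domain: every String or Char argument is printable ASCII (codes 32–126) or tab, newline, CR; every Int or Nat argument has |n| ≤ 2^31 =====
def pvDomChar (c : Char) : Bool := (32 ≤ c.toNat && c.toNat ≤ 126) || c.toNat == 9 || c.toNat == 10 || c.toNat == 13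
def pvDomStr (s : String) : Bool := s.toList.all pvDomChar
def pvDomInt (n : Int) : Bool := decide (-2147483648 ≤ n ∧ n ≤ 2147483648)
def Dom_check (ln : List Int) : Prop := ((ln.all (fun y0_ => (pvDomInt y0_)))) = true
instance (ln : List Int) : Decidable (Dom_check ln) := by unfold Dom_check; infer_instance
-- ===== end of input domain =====

-- B sorts the list and classifies run lengths in one grouping pass, instead of A's per-element ln.count calls (faster algorithm).
-- ===== PORT A =====
def check (ln : List Int) : Bool :=
  let s : PySem.Set Int := ln.foldl (fun s el => PySem.Set.add s ((ln.count el : Int))) PySem.Set.empty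
  if PySem.Set.contains s 1 && decide (1 ≤ (s.filter (fun el => decide (3 ≤ el))).sum) then
    true
  else
    false

-- ===== PORT B =====
-- the 'for x in srt[1:]' loop of Source B, carrying (cur, run, seen_one, seen_three);
-- the final run is classified when the list is exhausted, as after Source B's loop
def goB : List Int → Int → Int → Bool → Bool → Bool
  | [], _cur, run, s1, s3 => (s1 || (run == 1)) && (s3 || decide (3 ≤ run))
  | x :: rest, cur, run, s1, s3 =>
    if x == cur then goB rest cur (run + 1) s1 s3
    else goB rest x 1 (s1 || (run == 1)) (s3 || decide (3 ≤ run))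

def check_alt (ln : List Int) : Bool :=
  match PySem.List.sorted ln (fun x => x) false with
  | [] => false
  | c :: rest => goB rest c 1 false false

-- ===== PRECONDITION & SPEC =====
def Spec_check (ln : List Int) (out : Bool) : Prop := out = check_alt ln
instance (ln : List Int) (out : Bool) : Decidable (Spec_check ln out) := by unfold Spec_check; infer_instance

-- ===== CLAIM (what is proved, stated in full; the proofs are below) =====
def Claim_equal_check : Prop := ∀ (ln : List Int), Dom_check ln → Spec_check ln (check ln)

-- ===== LEMMAS AND PROOFS =====
-- Both programs decide the same property: some element occurs exactly once, and some element occurs at least three times.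
def CharProp (ln : List Int) : Prop :=
  (∃ el ∈ ln, ln.count el = 1) ∧ (∃ el ∈ ln, 3 ≤ ln.count el)

theorem check_A_set (ln : List Int) :
    ln.foldl (fun s el => PySem.Set.add s ((ln.count el : Int))) PySem.Set.empty
      = PySem.Set.ofList (ln.map (fun el => (ln.count el : Int))) := by
  rw [PySem.Set.ofList_eq_foldl, List.foldl_map]
  rfl

theorem sum_ge_one_iff_ne_nil (l : List Int) (h : ∀ x ∈ l, 3 ≤ x) :
    (1 ≤ l.sum) ↔ l ≠ [] := by
  cases l with
  | nil => simp
  | cons a t =>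
    simp only [List.sum_cons, ne_eq, reduceCtorEq, not_false_eq_true, iff_true]
    have ha : 3 ≤ a := h a (by simp)
    have ht : 0 ≤ t.sum :=
      List.sum_nonneg (fun x hx => le_trans (by norm_num) (h x (by simp [hx])))
    omega

theorem check_iff (ln : List Int) : check ln = true ↔ CharProp ln := by
  unfold check CharProp
  show (if ((ln.foldl (fun s el => PySem.Set.add s ((ln.count el : Int))) PySem.Set.empty).contains 1
        && decide (1 ≤ ((ln.foldl (fun s el => PySem.Set.add s ((ln.count el : Int)))
          PySem.Set.empty).filter (fun el => decide (3 ≤ el))).sum)) = true then true else false) = true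
      ↔ (∃ el ∈ ln, ln.count el = 1) ∧ (∃ el ∈ ln, 3 ≤ ln.count el)
  rw [check_A_set]
  have hmem : ∀ x : Int,
      x ∈ PySem.Set.ofList (ln.map (fun el => (ln.count el : Int))) ↔
        ∃ el ∈ ln, (ln.count el : Int) = x := by
    intro x; rw [PySem.Set.mem_ofList]; simp
  have hfilt : ∀ x ∈ (PySem.Set.ofList (ln.map (fun el => (ln.count el : Int)))).filter
      (fun el => decide (3 ≤ el)), (3 : Int) ≤ x := by
    intro x hx; have := List.of_mem_filter hx; simpa using this
  by_cases h : ((PySem.Set.ofList (ln.map (fun el => (ln.count el : Int)))).contains 1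
        && decide (1 ≤ ((PySem.Set.ofList (ln.map (fun el => (ln.count el : Int)))).filter
          (fun el => decide (3 ≤ el))).sum)) = true
  · rw [if_pos h]
    refine iff_of_true rfl ?_
    rw [Bool.and_eq_true, decide_eq_true_eq] at h
    obtain ⟨h1, h2⟩ := h
    constructor
    · rw [PySem.Set.contains_iff, hmem] at h1
      obtain ⟨el, hel, he⟩ := h1
      exact ⟨el, hel, by omega⟩
    · rw [sum_ge_one_iff_ne_nil _ hfilt] at h2
      obtain ⟨v, hv⟩ := List.exists_mem_of_ne_nil _ h2
      have hv3 : (3 : Int) ≤ v := hfilt v hv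
      have hv' := List.mem_of_mem_filter hv
      rw [hmem] at hv'
      obtain ⟨el, hel, he⟩ := hv'
      exact ⟨el, hel, by omega⟩
  · rw [if_neg h]
    refine iff_of_false (by simp) ?_
    rintro ⟨⟨e1, he1, hc1⟩, ⟨e3, he3, hc3⟩⟩
    rw [Bool.and_eq_true, decide_eq_true_eq] at h
    refine h ⟨?_, ?_⟩
    · rw [PySem.Set.contains_iff, hmem]
      exact ⟨e1, he1, by omega⟩
    · rw [sum_ge_one_iff_ne_nil _ hfilt]
      intro hnil
      have hm : (ln.count e3 : Int) ∈
          (PySem.Set.ofList (ln.map (fun el => (ln.count el : Int)))).filter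
            (fun el => decide (3 ≤ el)) := by
        rw [List.mem_filter]
        exact ⟨(hmem _).2 ⟨e3, he3, rfl⟩, by simp; omega⟩
      rw [hnil] at hm
      exact absurd hm (List.not_mem_nil)

-- the run-scan invariant: with `run` pending copies of `cur` already seen and `s` the sorted
-- remainder, goB decides "some total multiplicity is 1" ∧ "some total multiplicity is ≥ 3"
theorem goB_iff (s : List Int) : ∀ (cur run : Int) (s1 s3 : Bool),
    (cur :: s).Pairwise (· ≤ ·) → 1 ≤ run →
    (goB s cur run s1 s3 = true ↔
      ((s1 = true ∨ ∃ el ∈ cur :: s, (if el = cur then run else 0) + (s.count el : Int) = 1) ∧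
       (s3 = true ∨ ∃ el ∈ cur :: s, 3 ≤ (if el = cur then run else 0) + (s.count el : Int)))) := by
  induction s with
  | nil =>
    intro cur run s1 s3 _ hrun
    simp only [goB, Bool.and_eq_true, Bool.or_eq_true, beq_iff_eq, decide_eq_true_eq,
      List.mem_singleton, List.count_nil]
    constructor
    · rintro ⟨h1, h3⟩
      exact ⟨h1.imp id (fun e => ⟨cur, rfl, by simp [e]⟩),
             h3.imp id (fun e => ⟨cur, rfl, by simp; omega⟩)⟩
    · rintro ⟨h1, h3⟩
      refine ⟨h1.imp id ?_, h3.imp id ?_⟩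
      · rintro ⟨el, rfl, he⟩; simpa using he
      · rintro ⟨el, rfl, he⟩; simp at he; omega
  | cons x s' ih =>
    intro cur run s1 s3 hsor hrun
    by_cases hx : x = cur
    · subst hx
      have hsor' : (x :: s').Pairwise (· ≤ ·) := hsor.tail
      have := ih x (run + 1) s1 s3 hsor' (by omega)
      rw [show goB (x :: s') x run s1 s3 = goB s' x (run + 1) s1 s3 by simp [goB], this]
      have hcnt : ∀ el, (if el = x then run else 0) + ((x :: s').count el : Int)
          = (if el = x then run + 1 else 0) + (s'.count el : Int) := by
        intro el
        by_cases he : el = x <;> simp [List.count_cons, he] <;> omega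
      constructor <;> rintro ⟨h1, h3⟩ <;>
        refine ⟨h1.imp id ?_, h3.imp id ?_⟩ <;>
        · rintro ⟨el, hel, he⟩
          refine ⟨el, by simpa using (by simpa using hel), ?_⟩
          rw [hcnt el] at *
          exact he
    · -- run boundary: x ≠ cur, hence cur < x and cur appears nowhere in x :: s'
      have hlex : cur ≤ x := hsor.rel_head (by simp)
      have hall : ∀ y ∈ x :: s', cur < y := by
        intro y hy
        rcases List.mem_cons.mp hy with rfl | hy'
        · rcases lt_or_eq_of_le hlex with h | h
          · exact h
          · exact absurd h.symm hx
        · have h2 : x ≤ y := List.rel_of_pairwise_cons hsor.tail hy'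
          have : cur < x := by
            rcases lt_or_eq_of_le hlex with h | h
            · exact h
            · exact absurd h.symm hx
          omega
      have hnotmem : cur ∉ x :: s' := fun hc => absurd (hall cur hc) (lt_irrefl cur)
      have hcnt0 : (x :: s').count cur = 0 := List.count_eq_zero.mpr hnotmem
      have hsor' : (x :: s').Pairwise (· ≤ ·) := hsor.tail
      have := ih x 1 (s1 || (run == 1)) (s3 || decide (3 ≤ run)) hsor' (by omega)
      rw [show goB (x :: s') cur run s1 s3
            = goB s' x 1 (s1 || (run == 1)) (s3 || decide (3 ≤ run)) by
          simp [goB, hx], this]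
      have hcnt : ∀ el ∈ x :: s', (if el = cur then run else 0) + ((x :: s').count el : Int)
          = (if el = x then (1 : Int) else 0) + (s'.count el : Int) := by
        intro el hel
        have hne : el ≠ cur := fun hc => hnotmem (hc ▸ hel)
        by_cases he : el = x <;> simp [List.count_cons, he, hne] <;> omega
      simp only [Bool.or_eq_true, beq_iff_eq, decide_eq_true_eq]
      constructor
      · rintro ⟨h1, h3⟩
        constructor
        · rcases h1 with (h | h) | ⟨el, hel, he⟩
          · exact Or.inl h
          · exact Or.inr ⟨cur, by simp, by simp [hcnt0]; omega⟩
          · exact Or.inr ⟨el, by simp [hel], by rw [hcnt el hel]; exact he⟩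
        · rcases h3 with (h | h) | ⟨el, hel, he⟩
          · exact Or.inl h
          · exact Or.inr ⟨cur, by simp, by simp [hcnt0]; omega⟩
          · exact Or.inr ⟨el, by simp [hel], by rw [hcnt el hel]; exact he⟩
      · rintro ⟨h1, h3⟩
        constructor
        · rcases h1 with h | ⟨el, hel, he⟩
          · exact Or.inl (Or.inl h)
          · rcases List.mem_cons.mp hel with rfl | hel'
            · exact Or.inl (Or.inr (by simp [hcnt0] at he; omega))
            · exact Or.inr ⟨el, hel', by rw [← hcnt el hel']; exact he⟩
        · rcases h3 with h | ⟨el, hel, he⟩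
          · exact Or.inl (Or.inl h)
          · rcases List.mem_cons.mp hel with rfl | hel'
            · exact Or.inl (Or.inr (by simp [hcnt0] at he; omega))
            · exact Or.inr ⟨el, hel', by rw [← hcnt el hel']; exact he⟩

theorem check_alt_iff (ln : List Int) : check_alt ln = true ↔ CharProp ln := by
  unfold check_alt CharProp
  have hperm : (PySem.List.sorted ln (fun x => x) false).Perm ln := PySem.List.sorted_perm ln _ _
  cases hsrt : PySem.List.sorted ln (fun x => x) false with
  | nil =>
    have : ln = [] := by rwa [PySem.List.sorted_eq_nil_iff] at hsrt
    subst this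
    simp
  | cons c rest =>
    have hsor : (c :: rest).Pairwise (· ≤ ·) := by
      have := PySem.List.sorted_pairwise (xs := ln) (key := fun x => x)
      rwa [hsrt] at this
    show goB rest c 1 false false = true ↔ _
    rw [goB_iff rest c 1 false false hsor (by omega)]
    have hcnt : ∀ el, (if el = c then (1 : Int) else 0) + (rest.count el : Int)
        = ((c :: rest).count el : Int) := by
      intro el; by_cases he : el = c <;> simp [List.count_cons, he] <;> omega
    have hmem : ∀ el, el ∈ c :: rest ↔ el ∈ ln := fun el => by
      rw [← hsrt, PySem.List.mem_sorted]
    have hcnt2 : ∀ el, (c :: rest).count el = ln.count el := fun el => by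
      rw [← hsrt, hperm.count_eq]
    constructor
    · rintro ⟨h1, h3⟩
      refine ⟨?_, ?_⟩
      · rcases h1 with h | ⟨el, hel, he⟩
        · exact absurd h (by simp)
        · exact ⟨el, (hmem el).mp hel, by rw [hcnt el, hcnt2 el] at he; omega⟩
      · rcases h3 with h | ⟨el, hel, he⟩
        · exact absurd h (by simp)
        · exact ⟨el, (hmem el).mp hel, by rw [hcnt el, hcnt2 el] at he; omega⟩
    · rintro ⟨⟨e1, he1, hc1⟩, ⟨e3, he3, hc3⟩⟩
      refine ⟨Or.inr ⟨e1, (hmem e1).mpr he1, ?_⟩, Or.inr ⟨e3, (hmem e3).mpr he3, ?_⟩⟩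
      · rw [hcnt e1, hcnt2 e1]; omega
      · rw [hcnt e3, hcnt2 e3]; omega

-- ===== VERDICT (by name: the statement is the Claim_ definition above) =====
theorem check_spec : Claim_equal_check := by
  intro ln _
  unfold Spec_check
  rw [Bool.eq_iff_iff, check_iff, check_alt_iff]
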